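-- pv_equiv track=rewrite | github.com/Jonymatos/AdventCode-2021 | d3/d3.py | get_bit
-- ===== SOURCE A (Python) =====
-- def get_bit(nums, ind):
--     count0 = count1 = 0
--
--     for j in range(len(nums)):
--         if nums[j][ind] == '0':
--             count0 += 1
--         else:
--             count1 += 1
--
--     bit = 0 if count0 > count1 else 1
--     return bit
-- ===== SOURCE B (Python) =====
-- def get_bit(nums, ind):
--     # Majority via sorted median: map rows to 0/1 flags, sort, take the middle element.
--     # With n flags of which z are 0, flags[n//2] is 0 iff z > n//2 iff zeros strictly
--     # outnumber ones; on a tie the 1-block starts exactly at n//2, matching tie -> 1.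
--     if not nums:
--         return 1
--     flags = sorted(0 if row[ind] == '0' else 1 for row in nums)
--     return flags[len(flags) // 2]
-- ===== Notes on version B (the rewrite author's own statement) =====
-- stated objective: alternative
-- what changed: B computes the majority bit as the median of the sorted 0/1 flags (map rows to flags, sort, index the middle), instead of A's single pass maintaining two parallel counters and comparing them.
import Mathlib
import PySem

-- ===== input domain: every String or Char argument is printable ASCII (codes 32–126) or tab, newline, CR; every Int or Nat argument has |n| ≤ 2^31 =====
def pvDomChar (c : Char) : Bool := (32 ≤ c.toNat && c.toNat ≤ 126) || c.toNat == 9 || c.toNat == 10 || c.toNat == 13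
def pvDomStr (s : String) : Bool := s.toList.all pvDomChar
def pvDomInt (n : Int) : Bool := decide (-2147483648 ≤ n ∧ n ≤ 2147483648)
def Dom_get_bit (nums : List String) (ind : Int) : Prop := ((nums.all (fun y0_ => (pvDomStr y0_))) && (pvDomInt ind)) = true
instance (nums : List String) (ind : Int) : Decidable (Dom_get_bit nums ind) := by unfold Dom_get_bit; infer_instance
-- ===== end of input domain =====

-- B computes the majority bit as the median of the sorted 0/1 flags instead of A's
-- two-counter comparison loop (alternative algorithm; return-value equivalence).
-- ===== PORT A =====
def get_bit (nums : List String) (ind : Int) : Int :=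
  -- for j in range(len(nums)): branch on nums[j][ind] == '0'; out-of-range (excluded by Pre_) falls to else
  let c := nums.foldl (fun (c : Int × Int) s =>
    if PySem.Str.pyGet? s ind = some '0' then (c.1 + 1, c.2) else (c.1, c.2 + 1)) (0, 0)
  if c.1 > c.2 then 0 else 1

-- ===== PORT B =====
def get_bit_alt (nums : List String) (ind : Int) : Int :=
  if nums = [] then 1
  else
    let flags := PySem.List.sorted
      (nums.map (fun row => if PySem.Str.pyGet? row ind = some '0' then (0 : Int) else 1))
      (fun x => x) false
    PySem.List.pyGetD flags (PySem.Int.floordiv (flags.length : Int) 2) 0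

-- ===== PRECONDITION & SPEC =====
-- Pre_ excludes exactly the inputs where A raises IndexError: some row too short for ind.
def Pre_get_bit (nums : List String) (ind : Int) : Prop :=
  ∀ s ∈ nums, PySem.Raise.InRange s.toList.length ind
instance (nums : List String) (ind : Int) : Decidable (Pre_get_bit nums ind) := by
  unfold Pre_get_bit; infer_instance
def pvWitness_get_bit : List String × Int := (["010", "110", "001"], 1)
def Spec_get_bit (nums : List String) (ind : Int) (out : Int) : Prop := out = get_bit_alt nums ind
instance (nums : List String) (ind : Int) (out : Int) : Decidable (Spec_get_bit nums ind out) := by unfold Spec_get_bit; infer_instance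

-- ===== CLAIM (what is proved, stated in full; the proofs are below) =====
def Claim_equal_get_bit : Prop := ∀ (nums : List String) (ind : Int), Dom_get_bit nums ind → Pre_get_bit nums ind → Spec_get_bit nums ind (get_bit nums ind)

-- ===== LEMMAS AND PROOFS =====

-- A's loop: first counter counts '0' rows, second counts the rest.
lemma get_bit_fold (nums : List String) (ind : Int) (a b : Int) :
    nums.foldl (fun (c : Int × Int) s =>
      if PySem.Str.pyGet? s ind = some '0' then (c.1 + 1, c.2) else (c.1, c.2 + 1)) (a, b)
    = (a + (nums.countP (fun s => PySem.Str.pyGet? s ind == some '0') : Int),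
       b + ((nums.length : Int) - (nums.countP (fun s => PySem.Str.pyGet? s ind == some '0') : Int))) := by
  induction nums generalizing a b with
  | nil => simp
  | cons x xs ih =>
    by_cases h : PySem.Str.pyGet? x ind = some '0'
    · have hb : (PySem.Str.pyGet? x ind == some '0') = true := beq_iff_eq.mpr h
      simp only [List.foldl_cons, List.countP_cons, List.length_cons, if_pos h, hb, if_true,
        ih, Prod.mk.injEq]
      push_cast; omega
    · have hb : (PySem.Str.pyGet? x ind == some '0') = false := by simpa using h
      simp only [List.foldl_cons, List.countP_cons, List.length_cons, if_neg h, hb,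
        ih, Prod.mk.injEq]
      push_cast; omega

-- B's sort: since every flag is 0 or 1, the sorted flag list is the zeros block
-- followed by the ones block.
lemma flags_perm (nums : List String) (ind : Int) :
    (List.replicate (nums.countP (fun s => PySem.Str.pyGet? s ind == some '0')) (0 : Int)
      ++ List.replicate (nums.length - nums.countP (fun s => PySem.Str.pyGet? s ind == some '0')) (1 : Int)).Perm
    (nums.map (fun row => if PySem.Str.pyGet? row ind = some '0' then (0 : Int) else 1)) := by
  induction nums with
  | nil => simp
  | cons x xs ih =>
    by_cases h : PySem.Str.pyGet? x ind = some '0'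
    · have hb : (PySem.Str.pyGet? x ind == some '0') = true := beq_iff_eq.mpr h
      simp only [List.map_cons, List.countP_cons, List.length_cons, hb, if_pos h, if_true]
      have hle : xs.countP (fun s => PySem.Str.pyGet? s ind == some '0') ≤ xs.length :=
        List.countP_le_length
      rw [show xs.countP (fun s => PySem.Str.pyGet? s ind == some '0') + 1
            = (xs.countP (fun s => PySem.Str.pyGet? s ind == some '0')) + 1 from rfl,
          List.replicate_succ,
          show xs.length + 1 - (xs.countP (fun s => PySem.Str.pyGet? s ind == some '0') + 1)
            = xs.length - xs.countP (fun s => PySem.Str.pyGet? s ind == some '0') by omega]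
      exact (ih.cons 0)
    · have hb : (PySem.Str.pyGet? x ind == some '0') = false := by simpa using h
      simp only [List.map_cons, List.countP_cons, List.length_cons, hb, if_neg h,
        Bool.false_eq_true, if_false, Nat.add_zero]
      have hle : xs.countP (fun s => PySem.Str.pyGet? s ind == some '0') ≤ xs.length :=
        List.countP_le_length
      rw [show xs.length + 1 - xs.countP (fun s => PySem.Str.pyGet? s ind == some '0')
            = (xs.length - xs.countP (fun s => PySem.Str.pyGet? s ind == some '0')) + 1 by omega,
          List.replicate_succ]
      exact List.perm_middle.trans (ih.cons 1)
  
lemma flags_sorted_eq (nums : List String) (ind : Int) :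
    PySem.List.sorted
      (nums.map (fun row => if PySem.Str.pyGet? row ind = some '0' then (0 : Int) else 1))
      (fun x => x) false
    = List.replicate (nums.countP (fun s => PySem.Str.pyGet? s ind == some '0')) (0 : Int)
      ++ List.replicate (nums.length - nums.countP (fun s => PySem.Str.pyGet? s ind == some '0')) (1 : Int) := by
  refine PySem.List.sorted_id_eq_of_perm_of_pairwise _ _ (flags_perm nums ind) ?_
  rw [List.pairwise_append]
  refine ⟨List.pairwise_replicate.mpr (Or.inr le_rfl),
          List.pairwise_replicate.mpr (Or.inr le_rfl), ?_⟩
  intro a ha b hb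
  rw [List.eq_of_mem_replicate ha, List.eq_of_mem_replicate hb]; norm_num

-- ===== VERDICT (by name: the statement is the Claim_ definition above) =====
theorem get_bit_spec : Claim_equal_get_bit := by
  intro nums ind _ _
  unfold Spec_get_bit get_bit get_bit_alt
  rw [get_bit_fold]
  by_cases hnil : nums = []
  · subst hnil; simp
  · rw [if_neg hnil, flags_sorted_eq]
    dsimp only
    set z := nums.countP (fun s => PySem.Str.pyGet? s ind == some '0') with hz
    have hle : z ≤ nums.length := List.countP_le_length
    have hlen : (List.replicate z (0 : Int) ++ List.replicate (nums.length - z) (1 : Int)).length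
        = nums.length := by simp; omega
    have hpos : 0 < nums.length := List.length_pos_iff.mpr hnil
    have hfd : PySem.Int.floordiv
        ((List.replicate z (0 : Int) ++ List.replicate (nums.length - z) (1 : Int)).length : Int) 2
        = ((nums.length / 2 : Nat) : Int) := by
      rw [hlen]
      simp only [PySem.Int.floordiv, Int.fdiv_eq_ediv]
      omega
    rw [hfd]
    have hidx : (nums.length / 2 : Nat) <
        (List.replicate z (0 : Int) ++ List.replicate (nums.length - z) (1 : Int)).length := by
      rw [hlen]; omega
    rw [PySem.List.pyGetD_natCast]
    rw [List.getD_eq_getElem _ _ hidx]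
    by_cases hmaj : nums.length / 2 < z
    · have : (List.replicate z (0 : Int) ++ List.replicate (nums.length - z) (1 : Int))[nums.length / 2] = 0 := by
        rw [List.getElem_append_left (by simpa using hmaj)]; simp
      rw [this]
      rw [if_pos (by omega)]
    · have h2 : z ≤ nums.length / 2 := by omega
      have : (List.replicate z (0 : Int) ++ List.replicate (nums.length - z) (1 : Int))[nums.length / 2] = 1 := by
        rw [List.getElem_append_right (by simpa using h2)]; simp
      rw [this]
      rw [if_neg (by omega)]
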